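-- pv_equiv track=rewrite | github.com/ikadzev/nstu | Algo/Lab1/main.py | numToSimples
-- ===== SOURCE A (Python) =====
-- def numToSimples(inp):
--     itr = 0
--     for i in range(1, inp):
--         simp, itr = isSimple(i, itr)
--         if simp:
--             simp, itr = isSimple(inp - i, itr)
--             if simp:
--                 return itr
--
-- def isSimple(num, iterations):
--     for i in range(2, num // 2 + 1):
--         iterations += 1
--         if num % i == 0:
--             return False, iterations
--     return True, iterations
-- ===== SOURCE B (Python) =====
-- def numToSimples(inp):
--     total = 0
--     for i in range(1, inp):
--         s1, c1 = _simple_cost(i)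
--         total += c1
--         if s1:
--             s2, c2 = _simple_cost(inp - i)
--             total += c2
--             if s2:
--                 return total
--
--
-- def _simple_cost(n):
--     # (is n "simple" in A's sense, number of trial-division iterations A would
--     # spend on n) -- found arithmetically: scan only up to sqrt(n); the first
--     # divisor d (necessarily <= sqrt(n) when one exists in [2, n//2]) costs
--     # d - 1 iterations, and a full fruitless scan costs max(n//2 - 1, 0).
--     d = 2
--     while d * d <= n:
--         if n % d == 0:
--             return (False, d - 1)
--         d += 1
--     return (True, max(n // 2 - 1, 0))
-- ===== Notes on version B (the rewrite author's own statement) =====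
-- stated objective: faster
-- what changed: B replaces A's full trial-division scans up to n//2 with literal step counting by a sqrt(n)-bounded scan whose iteration count is computed arithmetically (first divisor d costs d-1 iterations, a fruitless scan costs max(n//2-1,0)), so each candidate is checked in O(sqrt n) instead of O(n).
import Mathlib
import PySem

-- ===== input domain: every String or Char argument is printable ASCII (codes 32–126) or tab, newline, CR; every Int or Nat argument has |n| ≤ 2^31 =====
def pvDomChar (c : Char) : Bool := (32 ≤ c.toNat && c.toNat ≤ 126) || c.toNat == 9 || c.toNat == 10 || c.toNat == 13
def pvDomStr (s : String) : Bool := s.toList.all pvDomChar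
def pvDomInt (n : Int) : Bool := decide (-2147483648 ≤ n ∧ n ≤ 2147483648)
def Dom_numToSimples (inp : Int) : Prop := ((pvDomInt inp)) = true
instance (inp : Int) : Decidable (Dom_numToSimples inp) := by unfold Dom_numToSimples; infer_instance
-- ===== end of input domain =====

-- B replaces A's full trial-division scans (up to n//2, counting every step) by a
-- sqrt-bounded scan whose iteration count is computed arithmetically (first divisor d
-- costs d-1, a fruitless scan costs max(n//2-1,0)); measurably faster, same values.

-- ===== PORT A =====
def isSimpleLoop (num : Int) : List Int → Int → Bool × Int
  | [], itr => (true, itr)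
  | i :: rest, itr =>
    let itr' := itr + 1
    if PySem.Int.mod num i = 0 then (false, itr') else isSimpleLoop num rest itr'

def isSimpleA (num iterations : Int) : Bool × Int :=
  isSimpleLoop num (PySem.List.pyRange 2 (PySem.Int.floordiv num 2 + 1) 1) iterations

def numToSimplesLoop (inp : Int) : List Int → Int → Option Int
  | [], _ => none
  | i :: rest, itr =>
    let r1 := isSimpleA i itr
    if r1.1 then
      let r2 := isSimpleA (inp - i) r1.2
      if r2.1 then some r2.2 else numToSimplesLoop inp rest r2.2
    else numToSimplesLoop inp rest r1.2

def numToSimples (inp : Int) : Option Int :=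
  numToSimplesLoop inp (PySem.List.pyRange 1 inp 1) 0

-- ===== PORT B =====
-- the `while d*d <= n` scan of Source B's _simple_cost; returns the first divisor found
def simpleCostLoop (n : Int) (d : Int) : Option Int :=
  if h : d * d ≤ n then
    if PySem.Int.mod n d = 0 then some d else simpleCostLoop n (d + 1)
  else none
termination_by (n + 2 - d).toNat
decreasing_by
  have h3 : 2 * d ≤ n + 1 := by nlinarith [mul_self_nonneg (d - 1)]
  have h4 : 0 ≤ n := le_trans (mul_self_nonneg d) h
  omega

def simpleCost (n : Int) : Bool × Int :=
  match simpleCostLoop n 2 with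
  | some d => (false, d - 1)
  | none => (true, max (PySem.Int.floordiv n 2 - 1) 0)

def numToSimplesAltLoop (inp : Int) : List Int → Int → Option Int
  | [], _ => none
  | i :: rest, total =>
    let r1 := simpleCost i
    let total1 := total + r1.2
    if r1.1 then
      let r2 := simpleCost (inp - i)
      let total2 := total1 + r2.2
      if r2.1 then some total2 else numToSimplesAltLoop inp rest total2
    else numToSimplesAltLoop inp rest total1

def numToSimples_alt (inp : Int) : Option Int :=
  numToSimplesAltLoop inp (PySem.List.pyRange 1 inp 1) 0

-- ===== PRECONDITION & SPEC =====
def Spec_numToSimples (inp : Int) (out : Option Int) : Prop := out = numToSimples_alt inp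
instance (inp : Int) (out : Option Int) : Decidable (Spec_numToSimples inp out) := by unfold Spec_numToSimples; infer_instance

-- ===== CLAIM (what is proved, stated in full; the proofs are below) =====
def Claim_equal_numToSimples : Prop := ∀ (inp : Int), Dom_numToSimples inp → Spec_numToSimples inp (numToSimples inp)

-- ===== LEMMAS AND PROOFS =====

-- a scan that finds no divisor returns (true, itr + length)
theorem isSimpleLoop_clean (num : Int) (l : List Int) (itr : Int)
    (h : ∀ i ∈ l, PySem.Int.mod num i ≠ 0) :
    isSimpleLoop num l itr = (true, itr + l.length) := by
  induction l generalizing itr with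
  | nil => simp [isSimpleLoop]
  | cons x xs ih =>
    have hx := h x (List.mem_cons_self)
    simp only [isSimpleLoop, if_neg hx]
    rw [ih _ (fun i hi => h i (List.mem_cons_of_mem _ hi))]
    simp; ring

-- a scan that hits a divisor d after a clean prefix returns (false, itr + |prefix| + 1)
theorem isSimpleLoop_hit (num : Int) (l1 l2 : List Int) (d itr : Int)
    (h1 : ∀ i ∈ l1, PySem.Int.mod num i ≠ 0) (hd : PySem.Int.mod num d = 0) :
    isSimpleLoop num (l1 ++ d :: l2) itr = (false, itr + l1.length + 1) := by
  induction l1 generalizing itr with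
  | nil => simp [isSimpleLoop, if_pos hd]
  | cons x xs ih =>
    have hx := h1 x (List.mem_cons_self)
    simp only [List.cons_append, isSimpleLoop, if_neg hx]
    rw [ih _ (fun i hi => h1 i (List.mem_cons_of_mem _ hi))]
    simp; ring

theorem simpleCostLoop_none (n : Int) (d : Int) :
    simpleCostLoop n d = none → 1 ≤ d → ∀ e, d ≤ e → e * e ≤ n → PySem.Int.mod n e ≠ 0 := by
  induction d using simpleCostLoop.induct n with
  | case1 x hdd hmod =>
    intro h
    rw [simpleCostLoop, dif_pos hdd, if_pos hmod] at h
    exact absurd h (by simp)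
  | case2 x hdd hmod ih =>
    intro h hd1 e he hee
    rw [simpleCostLoop, dif_pos hdd, if_neg hmod] at h
    rcases eq_or_lt_of_le he with rfl | hlt
    · exact hmod
    · exact ih h (by omega) e (by omega) hee
  | case3 x hdd =>
    intro _ hd1 e he hee hm
    nlinarith

theorem simpleCostLoop_some (n : Int) (d : Int) :
    ∀ e, simpleCostLoop n d = some e →
    d ≤ e ∧ e * e ≤ n ∧ PySem.Int.mod n e = 0 ∧
      ∀ f, d ≤ f → f < e → PySem.Int.mod n f ≠ 0 := by
  induction d using simpleCostLoop.induct n with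
  | case1 x hdd hmod =>
    intro e h
    rw [simpleCostLoop, dif_pos hdd, if_pos hmod] at h
    obtain rfl : x = e := by simpa using h
    exact ⟨le_refl _, hdd, hmod, fun f hf1 hf2 => absurd hf1 (by omega)⟩
  | case2 x hdd hmod ih =>
    intro e h
    rw [simpleCostLoop, dif_pos hdd, if_neg hmod] at h
    obtain ⟨h1, h2, h3, h4⟩ := ih e h
    refine ⟨by omega, h2, h3, fun f hf1 hf2 => ?_⟩
    rcases eq_or_lt_of_le hf1 with rfl | hlt
    · exact hmod
    · exact h4 f (by omega) hf2
  | case3 x hdd =>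
    intro e h
    rw [simpleCostLoop, dif_neg hdd] at h
    exact absurd h (by simp)

-- the crux: A's counting scan up to num//2 equals B's arithmetic cost
theorem isSimpleA_eq (num itr : Int) :
    isSimpleA num itr = ((simpleCost num).1, itr + (simpleCost num).2) := by
  unfold isSimpleA simpleCost
  set h2 : Int := PySem.Int.floordiv num 2 with hh
  rcases hcl : simpleCostLoop num 2 with _ | d
  · -- no divisor with d*d ≤ num: the full range is clean
    have hnone := simpleCostLoop_none num 2 hcl (by omega)
    have hclean : ∀ i ∈ PySem.List.pyRange 2 (h2 + 1) 1, PySem.Int.mod num i ≠ 0 := by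
      intro i hi hm
      rw [PySem.List.mem_pyRange_one] at hi
      obtain ⟨hi2, hiu⟩ := hi
      have hi_le : i ≤ h2 := by omega
      have h2n : i * 2 ≤ num := by
        rw [hh] at hi_le
        exact (PySem.Int.le_floordiv_iff_mul_le (by omega)).mp hi_le
      -- i divides num; let f = num / i be the cofactor
      have hdvd : i ∣ num := (PySem.Int.mod_eq_zero_iff_dvd num i).mp hm
      obtain ⟨f, hf⟩ := hdvd
      have hf2 : 2 ≤ f := by nlinarith
      rcases le_or_gt (i * i) num with hii | hii
      · exact hnone i hi2 hii hm
      · -- cofactor f satisfies f*f ≤ num and f ∣ num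
        have hfi : f < i := by nlinarith
        have hff : f * f ≤ num := by nlinarith
        have : PySem.Int.mod num f = 0 :=
          (PySem.Int.mod_eq_zero_iff_dvd num f).mpr ⟨i, by rw [hf]; ring⟩
        exact hnone f (by omega) hff this
    rw [isSimpleLoop_clean num _ itr hclean]
    simp [PySem.List.length_pyRange_one]
    omega
  · -- first divisor d found: 2 ≤ d, d*d ≤ num, minimal
    obtain ⟨hd2, hdd, hdm, hmin⟩ := simpleCostLoop_some num 2 d hcl
    have hd_le : d ≤ h2 := by
      have : d * 2 ≤ num := by nlinarith
      rw [hh]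
      exact (PySem.Int.le_floordiv_iff_mul_le (by omega)).mpr this
    rw [PySem.List.pyRange_one_append 2 d (h2 + 1) hd2 (by omega),
        PySem.List.pyRange_one_cons (show d < h2 + 1 by omega)]
    have hpre : ∀ i ∈ PySem.List.pyRange 2 d 1, PySem.Int.mod num i ≠ 0 := by
      intro i hi
      rw [PySem.List.mem_pyRange_one] at hi
      exact hmin i hi.1 hi.2
    rw [isSimpleLoop_hit num _ _ d itr hpre hdm]
    simp [PySem.List.length_pyRange_one]
    omega

theorem loops_eq (inp : Int) (l : List Int) (itr : Int) :
    numToSimplesLoop inp l itr = numToSimplesAltLoop inp l itr := by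
  induction l generalizing itr with
  | nil => rfl
  | cons i rest ih =>
    simp only [numToSimplesLoop, numToSimplesAltLoop, isSimpleA_eq]
    rcases h1 : simpleCost i with ⟨s1, c1⟩
    rcases h2 : simpleCost (inp - i) with ⟨s2, c2⟩
    by_cases hs1 : s1 = true
    · by_cases hs2 : s2 = true
      · simp [hs1, hs2, add_assoc]
      · simp [hs1, hs2, ih, add_assoc]
    · simp [hs1, ih]

-- ===== VERDICT (by name: the statement is the Claim_ definition above) =====
theorem numToSimples_spec : Claim_equal_numToSimples := by
  intro inp _
  unfold Spec_numToSimples numToSimples numToSimples_alt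
  exact loops_eq inp _ 0
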